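-- pv_equiv track=rewrite | github.com/UPEISMCSCCC/Code | snippets/math/reverse_binom.py | first_over
-- ===== SOURCE A (Python) =====
-- def first_over(k, c):
-- 	"""Binary search to find smallest value of n for which n^k >= c"""
-- 	n = 1
-- 	while n ** k < c:
-- 		n *= 2
-- 	# Invariant: lo**k < c <= hi**k
-- 	lo = 1
-- 	hi = n
-- 	while hi - lo > 1:
-- 		mid = lo + (hi - lo) // 2
-- 		if mid ** k < c:
-- 			lo = mid
-- 		else:
-- 			hi = mid
-- 	return hi
-- ===== SOURCE B (Python) =====
-- def first_over(k, c):
--     """Smallest n with n**k >= c, via an integer Newton iteration for the floor k-th root."""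
--     if c <= 1:
--         return 1
--     x = 1 << -(-c.bit_length() // k)  # 2**ceil(bitlen/k) is an upper bound on the k-th root
--     while True:
--         y = ((k - 1) * x + c // x ** (k - 1)) // k
--         if y < x:
--             x = y
--         else:
--             break
--     return x if x ** k >= c else x + 1
-- ===== Notes on version B (the rewrite author's own statement) =====
-- stated objective: alternative
-- what changed: Replaces A's exponential doubling plus lo/hi binary search with an integer Newton iteration for the floor k-th root (seeded from c.bit_length(), iterated until it stops decreasing, then adjusted by +1 when the root is not exact).
import Mathlib
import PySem

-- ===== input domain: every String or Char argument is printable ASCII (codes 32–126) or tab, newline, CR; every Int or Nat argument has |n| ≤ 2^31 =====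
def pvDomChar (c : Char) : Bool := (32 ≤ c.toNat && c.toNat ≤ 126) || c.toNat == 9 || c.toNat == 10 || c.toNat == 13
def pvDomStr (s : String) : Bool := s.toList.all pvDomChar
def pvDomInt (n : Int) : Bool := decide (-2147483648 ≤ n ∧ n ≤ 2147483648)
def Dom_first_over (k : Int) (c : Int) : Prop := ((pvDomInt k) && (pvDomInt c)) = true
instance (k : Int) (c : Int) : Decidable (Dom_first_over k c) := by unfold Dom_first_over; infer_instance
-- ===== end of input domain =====

-- B replaces A's doubling + lo/hi binary search with an integer Newton iteration for the
-- floor k-th root (seeded from c.bit_length()); equal return values proved on Pre_.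

-- ===== PORT A =====
-- doubling loop `while n ** k < c: n *= 2`; fuel only makes it total (c.toNat steps
-- always suffice inside Pre_, where k ≥ 1 or c ≤ 1)
def foDbl (K : Nat) (c : Int) : Nat → Int → Int
  | 0, n => n
  | fuel + 1, n => if n ^ K < c then foDbl K c fuel (n * 2) else n

-- binary-search loop `while hi - lo > 1: …`; fuel (hi - lo).toNat at the call site
def foBs (K : Nat) (c : Int) : Nat → Int → Int → Int
  | 0, _, hi => hi
  | fuel + 1, lo, hi =>
    if hi - lo > 1 then
      let mid := lo + PySem.Int.floordiv (hi - lo) 2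
      if mid ^ K < c then foBs K c fuel mid hi else foBs K c fuel lo mid
    else hi

def first_over (k : Int) (c : Int) : Int :=
  let n := foDbl k.toNat c c.toNat 1
  foBs k.toNat c (n - 1).toNat 1 n

-- ===== PORT B =====
-- `while True: y = ((k-1)*x + c // x**(k-1)) // k; if y < x: x = y else: break`;
-- the exponent (k-1).toNat is exact for k ≥ 1 (for k ≤ 0 the Python raises before the loop,
-- outside Pre_); fuel x₀.toNat only makes the strictly decreasing loop total
def foNewton (k : Int) (c : Int) : Nat → Int → Int
  | 0, x => x
  | fuel + 1, x =>
    let y := PySem.Int.floordiv ((k - 1) * x + PySem.Int.floordiv c (x ^ (k - 1).toNat)) k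
    if y < x then foNewton k c fuel y else x

def first_over_alt (k : Int) (c : Int) : Int :=
  if c ≤ 1 then 1
  else
    -- x0 = 1 << -(-c.bit_length() // k); the shift 2^e.toNat is exact for e ≥ 0 (k ≥ 1)
    let e : Int := -(PySem.Int.floordiv (-(PySem.Int.bitLength c : Int)) k)
    let x0 : Int := 2 ^ e.toNat
    let x := foNewton k c x0.toNat x0
    if c ≤ x ^ k.toNat then x else x + 1

-- ===== PRECONDITION & SPEC =====
-- Pre_ excludes exactly the inputs where Python A never returns: for k ≤ 0 and c > 1
-- the doubling loop diverges (n ** k stays ≤ 1 < c).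
def Pre_first_over (k : Int) (c : Int) : Prop := c ≤ 1 ∨ 1 ≤ k
instance (k : Int) (c : Int) : Decidable (Pre_first_over k c) := by unfold Pre_first_over; infer_instance
def pvWitness_first_over : Int × Int := (2, 10)

def Spec_first_over (k : Int) (c : Int) (out : Int) : Prop := out = first_over_alt k c
instance (k : Int) (c : Int) (out : Int) : Decidable (Spec_first_over k c out) := by unfold Spec_first_over; infer_instance

-- ===== CLAIM (what is proved, stated in full; the proofs are below) =====
def Claim_equal_first_over : Prop := ∀ (k : Int) (c : Int), Dom_first_over k c → Pre_first_over k c → Spec_first_over k c (first_over k c)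

-- ===== LEMMAS AND PROOFS =====

-- A-side: the doubling loop reaches a power bound
theorem foDbl_sound {K : Nat} (hK : 1 ≤ K) {c : Int} :
    ∀ (fuel : Nat) (n : Int), 1 ≤ n → c ≤ fuel + n →
      1 ≤ foDbl K c fuel n ∧ c ≤ (foDbl K c fuel n) ^ K := by
  intro fuel
  induction fuel with
  | zero =>
      intro n hn hc
      have hle : n ≤ n ^ K := le_self_pow₀ hn (by omega)
      simp only [foDbl]
      constructor
      · exact hn
      · simp at hc; omega
  | succ f ih =>
      intro n hn hc
      simp only [foDbl]
      split
      · exact ih (n * 2) (by omega) (by push_cast at hc ⊢; omega)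
      · exact ⟨hn, by omega⟩

-- A-side: the binary search returns the least h with c ≤ h^K
theorem foBs_sound {K : Nat} {c : Int} :
    ∀ (fuel : Nat) (lo hi : Int), 1 ≤ lo → lo < hi → lo ^ K < c → c ≤ hi ^ K →
      hi - lo ≤ (fuel : Int) →
      1 ≤ foBs K c fuel lo hi ∧ c ≤ (foBs K c fuel lo hi) ^ K ∧
        (foBs K c fuel lo hi - 1) ^ K < c := by
  intro fuel
  induction fuel with
  | zero => intro lo hi h1 h2 _ _ hf; exfalso; simp at hf; omega
  | succ f ih =>
      intro lo hi h1 h2 h3 h4 hf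
      simp only [foBs]
      split
      · rename_i hgt
        have hdpos : (0:Int) < 2 := by omega
        rw [PySem.Int.floordiv_eq_ediv_of_pos hdpos]
        set mid := lo + (hi - lo) / 2 with hmid
        have hb1 : lo < mid := by omega
        have hb2 : mid < hi := by omega
        split
        · rename_i hlt
          exact ih mid hi (by omega) hb2 hlt h4 (by omega)
        · rename_i hge
          exact ih lo mid h1 hb1 h3 (by omega) (by omega)
      · rename_i hle
        have : hi = lo + 1 := by omega
        subst this
        refine ⟨by omega, h4, by simpa using h3⟩

theorem first_over_le_one {k c : Int} (hc : c ≤ 1) : first_over k c = 1 := by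
  have hdbl : ∀ fuel : Nat, foDbl k.toNat c fuel 1 = 1 := by
    intro fuel
    cases fuel with
    | zero => simp [foDbl]
    | succ f => simp only [foDbl, one_pow]; rw [if_neg (by omega)]
  simp only [first_over, hdbl]
  norm_num
  cases h : ((1:Int) - 1).toNat with
  | zero => simp [foBs]
  | succ f => omega

-- integer AM–GM: (M+1)·r·x^M ≤ M·x^(M+1) + r^(M+1) for x, r ≥ 0
theorem amgm_pow (M : Nat) (x r : Int) (hx : 0 ≤ x) (hr : 0 ≤ r) :
    ((M : Int) + 1) * r * x ^ M ≤ (M : Int) * x ^ (M + 1) + r ^ (M + 1) := by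
  induction M with
  | zero => simp
  | succ m ih =>
      have hsign : 0 ≤ (x ^ (m + 1) - r ^ (m + 1)) * (x - r) := by
        rcases le_total r x with h | h
        · have := pow_le_pow_left₀ hr h (m + 1)
          have h2 : (0:Int) ≤ x - r := by omega
          nlinarith
        · have := pow_le_pow_left₀ hx h (m + 1)
          have h2 : (0:Int) ≤ r - x := by omega
          nlinarith
      have hxih := mul_le_mul_of_nonneg_right ih hx
      have e3 : ((m : Int) + 1) * r * x ^ (m + 1) ≤ (m : Int) * x ^ (m + 1) * x + r ^ (m + 1) * x := by
        calc ((m : Int) + 1) * r * x ^ (m + 1) = ((m : Int) + 1) * r * x ^ m * x := by ring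
          _ ≤ ((m : Int) * x ^ (m + 1) + r ^ (m + 1)) * x := by linarith
          _ = (m : Int) * x ^ (m + 1) * x + r ^ (m + 1) * x := by ring
      have e1 : x ^ (m + 1 + 1) = x ^ (m + 1) * x := pow_succ x (m + 1)
      have e2 : r ^ (m + 1 + 1) = r ^ (m + 1) * r := pow_succ r (m + 1)
      push_cast
      rw [e1, e2]
      nlinarith [hsign, e3]
  -- needed explicitly below
-- Newton update never drops below the floor root
theorem newton_lb (M : Nat) (x r c : Int) (hx : 1 ≤ x) (hr : 0 ≤ r)
    (hrc : r ^ (M + 1) ≤ c) :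
    r ≤ ((M : Int) * x + c / x ^ M) / ((M : Int) + 1) := by
  have hp : (0:Int) < x ^ M := by positivity
  have hK : (0:Int) < (M : Int) + 1 := by positivity
  have ham := amgm_pow M x r (by omega) hr
  have h1 : (((M : Int) + 1) * r - (M : Int) * x) * x ^ M ≤ c := by
    have : x ^ (M + 1) = x * x ^ M := by ring
    nlinarith
  have h2 : ((M : Int) + 1) * r - (M : Int) * x ≤ c / x ^ M :=
    (Int.le_ediv_iff_mul_le hp).2 h1
  have h3 : r * ((M : Int) + 1) ≤ (M : Int) * x + c / x ^ M := by linarith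
  exact (Int.le_ediv_iff_mul_le hK).2 h3

-- Newton update strictly decreases while x^K > c
theorem newton_dec (M : Nat) (x c : Int) (hx : 1 ≤ x) (hc : c < x ^ (M + 1)) :
    ((M : Int) * x + c / x ^ M) / ((M : Int) + 1) < x := by
  have hp : (0:Int) < x ^ M := by positivity
  have hK : (0:Int) < (M : Int) + 1 := by positivity
  have h1 : c / x ^ M < x := by
    refine (Int.ediv_lt_iff_lt_mul hp).2 ?_
    have : x ^ (M + 1) = x * x ^ M := by ring
    nlinarith
  refine (Int.ediv_lt_iff_lt_mul hK).2 ?_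
  nlinarith

-- with a valid floor root r ≤ x and enough fuel, the Newton loop returns exactly r
theorem foNewton_eq (M : Nat) (c r : Int) (hr : 1 ≤ r)
    (hrk : r ^ (M + 1) ≤ c) (hrc : c < (r + 1) ^ (M + 1)) :
    ∀ (fuel : Nat) (x : Int), r ≤ x → x ≤ (fuel : Int) →
      foNewton ((M : Int) + 1) c fuel x = r := by
  intro fuel
  induction fuel with
  | zero => intro x h1 h2; exfalso; simp at h2; omega
  | succ f ih =>
      intro x h1 h2
      have hx1 : 1 ≤ x := by omega
      have hp : (0:Int) < x ^ M := by positivity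
      have hK : (0:Int) < (M : Int) + 1 := by positivity
      have hMe : (((M : Int) + 1) - 1) = (M : Int) := by ring
      simp only [foNewton, hMe, Int.toNat_natCast,
        PySem.Int.floordiv_eq_ediv_of_pos hp, PySem.Int.floordiv_eq_ediv_of_pos hK]
      set y := ((M : Int) * x + c / x ^ M) / ((M : Int) + 1) with hy
      have hyr : r ≤ y := newton_lb M x r c hx1 (by omega) hrk
      split
      · rename_i hlt
        exact ih y hyr (by omega)
      · rename_i hge
        -- exit: here x^(M+1) ≤ c, so x ≤ r, hence x = r
        have hxc : x ^ (M + 1) ≤ c := by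
          by_contra hgt
          exact hge (newton_dec M x c hx1 (by omega))
        have hxr : x ≤ r := by
          by_contra hxr
          have : (r + 1) ^ (M + 1) ≤ x ^ (M + 1) :=
            pow_le_pow_left₀ (by omega) (by omega) (M + 1)
          omega
        omega

theorem le_two_pow_bitLength (c : Int) (hc : 0 < c) :
    c ≤ (2:Int) ^ PySem.Int.bitLength c := by
  have h1 : c.natAbs < 2 ^ PySem.Int.bitLength c := PySem.Int.lt_two_pow_bitLength c
  have h2 : (c.natAbs : Int) < (2:Int) ^ PySem.Int.bitLength c := by exact_mod_cast h1
  omega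

-- ===== VERDICT (by name: the statement is the Claim_ definition above) =====
theorem first_over_spec : Claim_equal_first_over := by
  intro k c _ hpre
  unfold Spec_first_over
  by_cases hc : c ≤ 1
  · rw [first_over_le_one hc, first_over_alt, if_pos hc]
  · have hc2 : 2 ≤ c := by omega
    have hk : 1 ≤ k := hpre.resolve_left (by omega)
    obtain ⟨M, hM⟩ : ∃ M : Nat, k = (M : Int) + 1 :=
      ⟨(k - 1).toNat, by omega⟩
    have hK : k.toNat = M + 1 := by omega
    -- A's result h satisfies (h-1)^(M+1) < c ≤ h^(M+1)
    have hfuel : c ≤ (c.toNat : Int) + 1 := by omega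
    obtain ⟨hn1, hnK⟩ := foDbl_sound (K := k.toNat) (by omega) c.toNat 1 (by omega) hfuel
    set n := foDbl k.toNat c c.toNat 1 with hn
    have hn2 : 2 ≤ n := by
      by_contra h
      have : n = 1 := by omega
      rw [this] at hnK; simp at hnK; omega
    obtain ⟨ha1, ha2, ha3⟩ :=
      foBs_sound (K := k.toNat) (c := c) (n - 1).toNat 1 n (by omega) (by omega)
        (by simpa using hc2) hnK (by omega)
    rw [first_over] at *
    set h := foBs k.toNat c (n - 1).toNat 1 n with hh
    rw [hK] at ha2 ha3
    -- B's seed x0 = 2^e dominates the floor root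
    simp only [first_over_alt, if_neg hc]
    have hkpos : (0:Int) < k := by omega
    set b : Nat := PySem.Int.bitLength c with hb
    set e : Int := -(PySem.Int.floordiv (-(b:Int)) k) with he
    have heb : (b : Int) ≤ e * k := by
      rw [he, PySem.Int.floordiv_eq_ediv_of_pos hkpos]
      have h1 := Int.emod_add_mul_ediv (-(b:Int)) k
      have h2 := Int.emod_nonneg (-(b:Int)) (by omega : k ≠ 0)
      have h3 : -((-(b:Int)) / k) * k = (b:Int) + (-(b:Int)) % k := by linarith
      omega
    have hb1 : 1 ≤ (b:Int) := by
      have hlt := PySem.Int.lt_two_pow_bitLength c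
      rw [← hb] at hlt
      have hne : b ≠ 0 := by
        intro h0
        rw [h0] at hlt
        simp at hlt
        omega
      exact_mod_cast Nat.one_le_iff_ne_zero.2 hne
    have he0 : 0 ≤ e := by
      by_contra he0
      have : e * k ≤ 0 := by
        have : e ≤ 0 := by omega
        exact mul_nonpos_of_nonpos_of_nonneg this (by omega)
      omega
    set x0 : Int := 2 ^ e.toNat with hx0
    have hbe : b ≤ e.toNat * (M + 1) := by
      have hcast : ((e.toNat * (M + 1) : Nat) : Int) = e * k := by
        push_cast; rw [hM]; rw [Int.toNat_of_nonneg he0]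
      have : (b : Int) ≤ ((e.toNat * (M + 1) : Nat) : Int) := by omega
      exact_mod_cast this
    have hcx0 : c ≤ x0 ^ (M + 1) := by
      have h1 : c ≤ (2:Int) ^ b := le_two_pow_bitLength c (by omega)
      have h2 : (2:Int) ^ b ≤ (2:Int) ^ (e.toNat * (M + 1)) :=
        pow_le_pow_right₀ (by omega) hbe
      calc c ≤ (2:Int) ^ b := h1
        _ ≤ (2:Int) ^ (e.toNat * (M + 1)) := h2
        _ = x0 ^ (M + 1) := by rw [hx0, ← pow_mul]
    have hx0pos : (1:Int) ≤ x0 := one_le_pow₀ (by omega)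
    have hfuel0 : x0 ≤ ((x0.toNat : Nat) : Int) := by
      rw [Int.toNat_of_nonneg (by omega)]
    -- case on whether c is exactly the power h^(M+1)
    by_cases hceq : c = h ^ (M + 1)
    · -- floor root is h itself; B returns it through the first branch
      have hx0h : h ≤ x0 := by
        by_contra hlt
        have : x0 ^ (M + 1) ≤ (h - 1) ^ (M + 1) :=
          pow_le_pow_left₀ (by omega) (by omega) (M + 1)
        omega
      have hnew := foNewton_eq M c h ha1 (by omega)
        (by
          have : h ^ (M+1) < (h + 1) ^ (M+1) := by
            have := pow_lt_pow_left₀ (show h < h + 1 by omega) (show (0:Int) ≤ h by omega) (show M+1 ≠ 0 by omega)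
            exact this
          omega)
        x0.toNat x0 hx0h hfuel0
      rw [hM]
      rw [show (((M:Int) + 1)).toNat = M + 1 from by omega, hnew, if_pos (by omega)]
    · -- floor root is h-1; B returns (h-1)+1 = h through the second branch
      have hclt : c < h ^ (M + 1) := by omega
      have hh2 : 2 ≤ h := by
        by_contra hh1
        have : h = 1 := by omega
        rw [this] at hclt; simp at hclt; omega
      have hx0h : h - 1 ≤ x0 := by
        by_contra hlt
        have : x0 ^ (M + 1) ≤ (h - 2) ^ (M + 1) :=
          pow_le_pow_left₀ (by omega) (by omega) (M + 1)
        have : (h - 2) ^ (M + 1) ≤ (h - 1) ^ (M + 1) :=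
          pow_le_pow_left₀ (by omega) (by omega) (M + 1)
        omega
      have hnew := foNewton_eq M c (h - 1) (by omega) (by omega)
        (by simpa using hclt) x0.toNat x0 hx0h hfuel0
      rw [hM]
      rw [show (((M:Int) + 1)).toNat = M + 1 from by omega, hnew, if_neg (by omega)]
      omega
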